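-- pv_equiv track=rewrite | github.com/xhcarina/UChi-Trading-2025 | case1_final/SlidingWindow.py | find_fair_price
-- ===== SOURCE A (Python) =====
-- from collections import defaultdict
--
-- def find_fair_price(orders):
--     """
--     Given a list of orders, each of which is (price, volume, order_type),
--     where order_type is either 'bid' or 'ask',
--     return the 'fair price' according to the parentheses-balancing idea.
--     """
--     # 1. Aggregate volumes by price
--     net_volumes = defaultdict(int)
--     for price, volume, order_type in orders:
--         if order_type.lower() == 'bid':
--             net_volumes[price] += volume   # bids add positive volume
--         else:
--             net_volumes[price] -= volume   # asks add negative volume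
--
--     # 2. Sort prices in ascending order
--     sorted_prices = sorted(net_volumes.keys())
--
--     # 3. Build a list of parentheses and remember each price's index range
--     parentheses = []
--     price_index_ranges = []  # will hold tuples (price, start_index, end_index)
--     current_index = 0
--
--     for p in sorted_prices:
--         v = net_volumes[p]
--         count = abs(v)
--         start_idx = current_index
--         if v > 0:
--             # Add "(" v times
--             parentheses.extend(["("] * count)
--         elif v < 0:
--             # Add ")" abs(v) times
--             parentheses.extend([")"] * count)
--         end_idx = current_index + count - 1
--         current_index += count
--
--         # Record which chunk of parentheses corresponds to this price
--         if count > 0:  # only store if there's actual volume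
--             price_index_ranges.append((p, start_idx, end_idx))
--
--     # If there's no volume at all, just return None or something sensible
--     if not parentheses:
--         return None
--
--     # 4. Compute prefix of "(" counts
--     prefix_open = [0] * (len(parentheses) + 1)
--     for i in range(len(parentheses)):
--         prefix_open[i+1] = prefix_open[i] + (1 if parentheses[i] == "(" else 0)
--
--
--
--     # Compute suffix of ")" counts
--     suffix_close = [0] * (len(parentheses) + 1)
--     for i in range(len(parentheses) - 1, -1, -1):
--         suffix_close[i] = suffix_close[i+1] + (1 if parentheses[i] == ")" else 0)
--
--     # 5. Find index i that minimizes |O(i) - C(i)|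
--     best_i = 0
--     best_diff = float('inf')
--     n = len(parentheses)
--
--     for i in range(n + 1):
--         # O(i) = # of "(" up to index i
--         Oi = prefix_open[i]
--         # C(i) = # of ")" from index i to the end
--         Ci = suffix_close[i]
--         diff = abs(Oi - Ci)
--         if diff < best_diff:
--             best_diff = diff
--             best_i = i
--
--     # 6. Map best_i back to a price
--     # best_i is effectively "between" best_i-1 and best_i in the parentheses array.
--     # We'll say that if best_i falls within a price's index range, that price is "fair."
--     fair_price = None
--     if best_i == 0:
--         # If best_i == 0, we are at the very beginning,
--         # so pick the first price in the sorted list (if any)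
--         if price_index_ranges:
--             fair_price = price_index_ranges[0][0]
--     elif best_i == n:
--         # If best_i == n, we are at the very end,
--         # so pick the last price in the sorted list
--         if price_index_ranges:
--             fair_price = price_index_ranges[-1][0]
--     else:
--         # Otherwise, find the chunk that covers best_i
--         for p, start_idx, end_idx in price_index_ranges:
--             if start_idx <= best_i <= end_idx:
--                 fair_price = p
--                 break
--
--     return fair_price
-- ===== SOURCE B (Python) =====
-- def find_fair_price(orders):
--     # Aggregate net volume per price; the optimal split index equals the total
--     # ask surplus, so locate it by one cumulative pass over price blocks.
--     net = {}
--     for price, volume, order_type in orders: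
--         net[price] = net.get(price, 0) + (volume if order_type.lower() == 'bid' else -volume)
--     blocks = [(p, net[p]) for p in sorted(net) if net[p] != 0]
--     if not blocks:
--         return None
--     T = sum(-v for _, v in blocks if v < 0)  # total ')' volume = optimal split point
--     cum = 0
--     for p, v in blocks:
--         cum += abs(v)
--         if T < cum:
--             return p
--     return blocks[-1][0]
-- ===== Notes on version B (the rewrite author's own statement) =====
-- stated objective: faster
-- what changed: B never materialises the per-unit parentheses string or its prefix/suffix arrays: the imbalance |O(i)-C(i)| equals |i - totalAskVolume|, so the optimal split index is the total ask surplus in closed form, and B locates its price block by one cumulative pass over the aggregated, sorted price blocks.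
import Mathlib
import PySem

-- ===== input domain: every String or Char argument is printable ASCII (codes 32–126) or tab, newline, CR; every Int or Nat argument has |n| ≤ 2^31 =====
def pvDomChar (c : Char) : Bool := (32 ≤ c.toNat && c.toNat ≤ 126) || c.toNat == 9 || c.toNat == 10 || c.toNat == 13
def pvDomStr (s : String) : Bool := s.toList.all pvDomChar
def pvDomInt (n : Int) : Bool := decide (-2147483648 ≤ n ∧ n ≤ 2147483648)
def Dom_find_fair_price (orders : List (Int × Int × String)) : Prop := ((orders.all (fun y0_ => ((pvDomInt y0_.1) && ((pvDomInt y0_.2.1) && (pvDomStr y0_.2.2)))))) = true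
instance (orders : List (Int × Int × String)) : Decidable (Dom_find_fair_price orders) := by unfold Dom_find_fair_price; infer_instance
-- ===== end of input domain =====

-- B avoids expanding volumes into a per-unit parentheses list: the optimal split
-- index is the total ask surplus in closed form, found by one pass over price blocks.

-- ===== PORT A =====

-- step 1: defaultdict(int) aggregation (shared wording with B because both Pythons aggregate identically)
def pvAgg (orders : List (Int × Int × String)) : PySem.Dict Int Int :=
  orders.foldl (fun d o =>
    if PySem.Str.lower o.2.2 = "bid" then d.modify o.1 0 (· + o.2.1)
    else d.modify o.1 0 (· - o.2.1)) PySem.Dict.empty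

-- step 3 loop: builds the parentheses list and the (price, start, end) ranges, carrying current_index
def pvPhase3 (d : PySem.Dict Int Int) : List Int → Int → List String × List (Int × Int × Int)
  | [], _ => ([], [])
  | p :: rest, cur =>
    let v := d.getD p 0
    let count := |v|
    let chunk : List String :=
      if v > 0 then List.replicate count.toNat "("
      else if v < 0 then List.replicate count.toNat ")" else []
    let r := pvPhase3 d rest (cur + count)
    (chunk ++ r.1, if count > 0 then (p, cur, cur + count - 1) :: r.2 else r.2)

-- step 4: prefix_open, filled left to right carrying the running value prefix_open[i]
def pvPrefixOpenGo : List String → Int → List Int → List Int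
  | [], _, out => out.reverse
  | c :: rest, acc, out =>
    let acc' := acc + if c = "(" then 1 else 0
    pvPrefixOpenGo rest acc' (acc' :: out)

def pvPrefixOpen (s : List String) (a : Int) : Array Int := (pvPrefixOpenGo s a [a]).toArray

-- step 4: suffix_close, filled right to left (the loop runs i = n-1 … 0)
def pvSuffixCloseGo : List String → List Int → List Int
  | [], out => out
  | c :: rest, out => pvSuffixCloseGo rest ((out.headD 0 + if c = ")" then 1 else 0) :: out)

def pvSuffixClose (s : List String) : Array Int := (pvSuffixCloseGo s.reverse [0]).toArray

-- step 5 loop over i in range(n+1); best_diff = none models float('inf')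
def pvBestLoop (po sc : Array Int) : List Nat → Int × Option Int → Int × Option Int
  | [], st => st
  | i :: rest, st =>
    let diff := |po.getD i 0 - sc.getD i 0|
    let upd : Bool := match st.2 with | none => true | some bd => diff < bd
    pvBestLoop po sc rest (if upd then ((i : Int), some diff) else st)

-- step 6 scan over price_index_ranges
def pvFindRange (bi : Int) : List (Int × Int × Int) → Option Int
  | [] => none
  | (p, s, e) :: rest => if s ≤ bi ∧ bi ≤ e then some p else pvFindRange bi rest

def find_fair_price (orders : List (Int × Int × String)) : Option Int :=
  let d := pvAgg orders
  let sortedPrices := PySem.List.sorted d.keys (fun x => x) false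
  let pr := pvPhase3 d sortedPrices 0
  if pr.1 = [] then none
  else
    let n := pr.1.length
    let po := pvPrefixOpen pr.1 0
    let sc := pvSuffixClose pr.1
    let bi := (pvBestLoop po sc (List.range (n + 1)) (0, none)).1
    if bi = 0 then pr.2.head?.map (·.1)
    else if bi = (n : Int) then pr.2.getLast?.map (·.1)
    else pvFindRange bi pr.2

-- ===== PORT B =====

-- cumulative pass: first block whose cumulative volume exceeds T
def pvBScan (T : Int) : List (Int × Int) → Int → Option Int
  | [], _ => none
  | (p, v) :: rest, cum =>
    let cum' := cum + |v|
    if T < cum' then some p else pvBScan T rest cum'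

def find_fair_price_alt (orders : List (Int × Int × String)) : Option Int :=
  let net := pvAgg orders
  let blocks := (PySem.List.sorted net.keys (fun x => x) false).filterMap
    (fun p => let v := net.getD p 0; if v ≠ 0 then some (p, v) else none)
  if blocks = [] then none
  else
    let T := (blocks.filterMap (fun b => if b.2 < 0 then some (-b.2) else none)).sum
    match pvBScan T blocks 0 with
    | some p => some p
    | none => (PySem.List.pyGet? blocks (-1)).map (·.1)

-- ===== PRECONDITION & SPEC =====
def Spec_find_fair_price (orders : List (Int × Int × String)) (out : Option Int) : Prop := out = find_fair_price_alt orders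
instance (orders : List (Int × Int × String)) (out : Option Int) : Decidable (Spec_find_fair_price orders out) := by unfold Spec_find_fair_price; infer_instance

-- ===== CLAIM (what is proved, stated in full; the proofs are below) =====
def Claim_equal_find_fair_price : Prop := ∀ (orders : List (Int × Int × String)), Dom_find_fair_price orders → Spec_find_fair_price orders (find_fair_price orders)

-- ===== LEMMAS AND PROOFS =====

-- proof-only abbreviations
def pvBlocks (d : PySem.Dict Int Int) (ps : List Int) : List (Int × Int) :=
  ps.filterMap (fun p => let v := d.getD p 0; if v ≠ 0 then some (p, v) else none)

def pvS (d : PySem.Dict Int Int) (ps : List Int) : Int :=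
  (ps.map (fun p => |d.getD p 0|)).sum

def pvT (d : PySem.Dict Int Int) (ps : List Int) : Int :=
  (ps.map (fun p => if d.getD p 0 < 0 then -(d.getD p 0) else 0)).sum

-- ALPHABET
theorem pv_alpha (d : PySem.Dict Int Int) (ps : List Int) (cur : Int) :
    ∀ c ∈ (pvPhase3 d ps cur).1, c = "(" ∨ c = ")" := by
  induction ps generalizing cur with
  | nil => simp [pvPhase3]
  | cons p rest ih =>
    intro c hc
    simp only [pvPhase3, List.mem_append] at hc
    rcases hc with h | h
    · split_ifs at h
      · left; exact List.eq_of_mem_replicate h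
      · right; exact List.eq_of_mem_replicate h
      · simp at h
    · exact ih _ c h

-- LENGTH
theorem pv_len (d : PySem.Dict Int Int) (ps : List Int) (cur : Int) :
    ((pvPhase3 d ps cur).1.length : Int) = pvS d ps := by
  induction ps generalizing cur with
  | nil => simp [pvPhase3, pvS]
  | cons p rest ih =>
    simp only [pvPhase3, pvS, List.map_cons, List.sum_cons, List.length_append] at *
    push_cast [← ih (cur + |d.getD p 0|)]
    rcases lt_trichotomy (d.getD p 0) 0 with h | h | h
    · rw [if_neg (by omega), if_pos h, abs_of_neg h]
      simp; omega
    · simp [h]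
    · rw [if_pos h, abs_of_pos h]
      simp; omega

-- COUNT OF ")"
theorem pv_countClose (d : PySem.Dict Int Int) (ps : List Int) (cur : Int) :
    (((pvPhase3 d ps cur).1.countP (fun c => c == ")")) : Int) = pvT d ps := by
  induction ps generalizing cur with
  | nil => simp [pvPhase3, pvT]
  | cons p rest ih =>
    simp only [pvPhase3, pvT, List.map_cons, List.sum_cons, List.countP_append] at *
    push_cast [← ih (cur + |d.getD p 0|)]
    rcases lt_trichotomy (d.getD p 0) 0 with h | h | h
    · rw [if_neg (by omega), if_pos h, if_pos h, abs_of_neg h]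
      simp [List.countP_replicate]; omega
    · simp [h]
    · rw [if_pos h, if_neg (by omega), abs_of_pos h]
      simp [List.countP_replicate]

-- BOUNDS
theorem pvBlocks_cons (d : PySem.Dict Int Int) (p : Int) (rest : List Int) :
    pvBlocks d (p :: rest) =
      if d.getD p 0 = 0 then pvBlocks d rest else (p, d.getD p 0) :: pvBlocks d rest := by
  rcases eq_or_ne (d.getD p 0) 0 with h | h <;> simp [pvBlocks, h]

-- blocks: first components match ranges
theorem pv_blocks_map (d : PySem.Dict Int Int) (ps : List Int) (cur : Int) :
    (pvPhase3 d ps cur).2.map (·.1) = (pvBlocks d ps).map (·.1) := by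
  induction ps generalizing cur with
  | nil => simp [pvPhase3, pvBlocks]
  | cons p rest ih =>
    rw [pvBlocks_cons]
    simp only [pvPhase3]
    rcases eq_or_ne (d.getD p 0) 0 with h | h
    · simp [h, ih]
    · rw [if_pos (by simpa using h), if_neg h]
      simp [ih]

theorem pv_blocks_ne (d : PySem.Dict Int Int) (ps : List Int) :
    ∀ b ∈ pvBlocks d ps, b.2 ≠ 0 := by
  intro b hb
  simp only [pvBlocks, List.mem_filterMap] at hb
  obtain ⟨p, _, hp⟩ := hb
  rcases eq_or_ne (d.getD p 0) 0 with h | h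
  · simp [h] at hp
  · rw [if_pos h] at hp
    cases hp
    exact h

theorem pv_blocks_sum_abs (d : PySem.Dict Int Int) (ps : List Int) :
    ((pvBlocks d ps).map (fun b => |b.2|)).sum = pvS d ps := by
  induction ps with
  | nil => simp [pvBlocks, pvS]
  | cons p rest ih =>
    rw [pvBlocks_cons]
    simp only [pvS, List.map_cons, List.sum_cons] at *
    rcases eq_or_ne (d.getD p 0) 0 with h | h
    · rw [if_pos h, ih, h]
      simp
    · rw [if_neg h]
      simp [ih]

theorem pv_blocks_T (d : PySem.Dict Int Int) (ps : List Int) :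
    ((pvBlocks d ps).filterMap (fun b => if b.2 < 0 then some (-b.2) else none)).sum = pvT d ps := by
  induction ps with
  | nil => simp [pvBlocks, pvT]
  | cons p rest ih =>
    rw [pvBlocks_cons]
    simp only [pvT, List.map_cons, List.sum_cons] at *
    rcases lt_trichotomy (d.getD p 0) 0 with h | h | h
    · rw [if_neg (by omega), List.filterMap_cons]
      simp only [if_pos h, List.sum_cons, ih]
    · rw [if_pos h, ih, h]
      simp
    · rw [if_neg (by omega), List.filterMap_cons]
      simp only [if_neg (by omega : ¬ d.getD p 0 < 0), ih]
      simp

theorem pv_blocks_nil_iff (d : PySem.Dict Int Int) (ps : List Int) :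
    pvBlocks d ps = [] ↔ pvS d ps = 0 := by
  induction ps with
  | nil => simp [pvBlocks, pvS]
  | cons p rest ih =>
    rw [pvBlocks_cons]
    simp only [pvS, List.map_cons, List.sum_cons] at *
    rcases eq_or_ne (d.getD p 0) 0 with h | h
    · rw [if_pos h, ih, h]
      simp
    · rw [if_neg h]
      constructor
      · intro hc; cases hc
      · intro hc
        exfalso
        have h1 : 0 < |d.getD p 0| := by positivity
        have h2 : 0 ≤ (rest.map (fun p => |d.getD p 0|)).sum := by
          apply List.sum_nonneg; intro x hx
          simp only [List.mem_map] at hx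
          obtain ⟨q, _, rfl⟩ := hx
          positivity
        omega

-- proof-side structural models of the two array-filling loops
def pvPrefixOpenRec : List String → Int → List Int
  | [], acc => [acc]
  | c :: rest, acc => acc :: pvPrefixOpenRec rest (acc + if c = "(" then 1 else 0)

def pvSuffixCloseRec : List String → List Int
  | [] => [0]
  | c :: rest =>
    let r := pvSuffixCloseRec rest
    (r.headD 0 + if c = ")" then 1 else 0) :: r

theorem pv_poGo (s : List String) :
    ∀ a tl, pvPrefixOpenGo s a (a :: tl) = tl.reverse ++ pvPrefixOpenRec s a := by
  induction s with
  | nil => intro a tl; simp [pvPrefixOpenGo, pvPrefixOpenRec]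
  | cons c rest ih =>
    intro a tl
    simp only [pvPrefixOpenGo, pvPrefixOpenRec]
    rw [ih _ (a :: tl)]
    simp

theorem pv_agetD (l : List Int) (i : Nat) (d : Int) : l.toArray.getD i d = l.getD i d := by
  by_cases h : i < l.length
  · simp [Array.getD, h, List.getD]
  · simp [Array.getD, h, List.getD]

theorem pv_po_eq (s : List String) (a : Int) : pvPrefixOpen s a = (pvPrefixOpenRec s a).toArray := by
  unfold pvPrefixOpen
  rw [pv_poGo s a []]
  simp

theorem pv_scGo (rs : List String) :
    ∀ t, pvSuffixCloseGo rs (pvSuffixCloseRec t) = pvSuffixCloseRec (rs.reverse ++ t) := by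
  induction rs with
  | nil => intro t; simp [pvSuffixCloseGo]
  | cons c rest ih =>
    intro t
    simp only [pvSuffixCloseGo]
    have : ((pvSuffixCloseRec t).headD 0 + if c = ")" then 1 else 0) :: pvSuffixCloseRec t
        = pvSuffixCloseRec (c :: t) := rfl
    rw [this, ih (c :: t)]
    simp

theorem pv_sc_eq (s : List String) : pvSuffixClose s = (pvSuffixCloseRec s).toArray := by
  have h := pv_scGo s.reverse []
  unfold pvSuffixClose
  simpa [pvSuffixCloseRec] using congrArg List.toArray h

-- prefix_open values
theorem pv_po_getD (s : List String) (a : Int) :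
    ∀ i ≤ s.length, (pvPrefixOpenRec s a).getD i 0 = a + ((s.take i).countP (fun c => c == "(") : Int) := by
  induction s generalizing a with
  | nil =>
    intro i hi
    have : i = 0 := by simpa using hi
    subst this
    simp [pvPrefixOpenRec]
  | cons c rest ih =>
    intro i hi
    cases i with
    | zero => simp [pvPrefixOpenRec]
    | succ j =>
      simp only [pvPrefixOpenRec, List.getD_cons_succ, List.take_succ_cons, List.countP_cons]
      rw [ih _ j (by simpa using hi)]
      by_cases h : c = "(" <;> simp [h]
      omega

-- suffix_close values
theorem pv_sc_getD (s : List String) :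
    ∀ i ≤ s.length, (pvSuffixCloseRec s).getD i 0 = (((s.drop i).countP (fun c => c == ")")) : Int) := by
  induction s with
  | nil =>
    intro i hi
    have : i = 0 := by simpa using hi
    subst this
    simp [pvSuffixCloseRec]
  | cons c rest ih =>
    intro i hi
    cases i with
    | zero =>
      simp only [pvSuffixCloseRec, List.getD_cons_zero, List.drop_zero, List.countP_cons]
      have hh : (pvSuffixCloseRec rest).headD 0 = (pvSuffixCloseRec rest).getD 0 0 := by
        cases hsc : pvSuffixCloseRec rest with
        | nil => simp
        | cons x xs => simp
      rw [hh, ih 0 (by omega)]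
      by_cases h : c = ")" <;> simp [h]
    | succ j =>
      simp only [pvSuffixCloseRec, List.getD_cons_succ, List.drop_succ_cons]
      exact ih j (by simpa using hi)

-- binary alphabet: the two counts add to the length
theorem pv_bin (l : List String) (h : ∀ c ∈ l, c = "(" ∨ c = ")") :
    l.countP (fun c => c == "(") + l.countP (fun c => c == ")") = l.length := by
  induction l with
  | nil => simp
  | cons c rest ih =>
    simp only [List.countP_cons, List.length_cons]
    rw [← ih (fun x hx => h x (List.mem_cons_of_mem _ hx))]
    rcases h c (List.mem_cons_self) with hc | hc <;> simp [hc] <;> omega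

-- the imbalance is i - T
theorem pv_diff (s : List String) (halpha : ∀ c ∈ s, c = "(" ∨ c = ")") :
    ∀ i ≤ s.length,
      (pvPrefixOpenRec s 0).getD i 0 - (pvSuffixCloseRec s).getD i 0
        = (i : Int) - (s.countP (fun c => c == ")") : Int) := by
  intro i hi
  rw [pv_po_getD s 0 i hi, pv_sc_getD s i hi]
  have hsplit : s.countP (fun c => c == ")")
      = (s.take i).countP (fun c => c == ")") + (s.drop i).countP (fun c => c == ")") := by
    rw [← List.countP_append, List.take_append_drop]
  have hbin : (s.take i).countP (fun c => c == "(") + (s.take i).countP (fun c => c == ")")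
      = (s.take i).length :=
    pv_bin _ (fun c hc => halpha c (List.take_subset i s hc))
  have hlen : (s.take i).length = i := List.length_take_of_le hi
  omega

-- once best_diff is 0 no later index updates (diff < 0 is impossible)
theorem pv_bestLoop_zero (po sc : Array Int) (l : List Nat) (bI : Int) :
    pvBestLoop po sc l (bI, some 0) = (bI, some 0) := by
  induction l with
  | nil => rfl
  | cons i rest ih =>
    simp only [pvBestLoop]
    rw [if_neg (by simp)]
    exact ih

-- main loop invariant: walking k, k+1, …, n the first minimum of |i - T| is i = T
theorem pv_bestLoop_main (po sc : Array Int) (n T : Nat) (hT : T ≤ n)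
    (hdiff : ∀ i ≤ n, po.getD i 0 - sc.getD i 0 = (i : Int) - (T : Int)) :
    ∀ t k st, k + t = T →
      (st.2 = none ∨ ∃ bd, st.2 = some bd ∧ (T : Int) - (k : Int) < bd) →
      pvBestLoop po sc (List.range' k (n + 1 - k)) st = ((T : Int), some 0) := by
  intro t
  induction t with
  | zero =>
    intro k st hk hst
    have hkT : k = T := by omega
    subst hkT
    have hrange : n + 1 - k = (n - k) + 1 := by omega
    rw [hrange, List.range'_succ]
    simp only [pvBestLoop]
    rw [hdiff k (by omega)]
    have habs : |((k : Int)) - (k : Int)| = 0 := by simp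
    rcases hst with h | ⟨bd, hbd, hlt⟩
    · rw [h]
      simp only [habs]
      rw [if_pos (by simp)]
      exact pv_bestLoop_zero po sc _ _
    · rw [hbd]
      simp only [habs]
      rw [if_pos (by simp; omega)]
      exact pv_bestLoop_zero po sc _ _
  | succ t ih =>
    intro k st hk hst
    have hkn : k < T := by omega
    have hrange : n + 1 - k = (n - k) + 1 := by omega
    rw [hrange, List.range'_succ]
    simp only [pvBestLoop]
    rw [hdiff k (by omega)]
    have habs : |((k : Int)) - (T : Int)| = (T : Int) - (k : Int) := by
      rw [abs_of_nonpos (by omega)]; ring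
    have hupd : (match st.2 with | none => true | some bd => decide (|(k : Int) - (T : Int)| < bd)) = true := by
      rcases hst with h | ⟨bd, hbd, hlt⟩
      · rw [h]
      · rw [hbd, habs]
        simp
        omega
    rw [hupd]
    rw [if_pos rfl, habs]
    have h2 : n + 1 - (k + 1) = n - k := by omega
    rw [← h2]
    exact ih (k + 1) _ (by omega) (Or.inr ⟨(T : Int) - (k : Int), rfl, by push_cast; omega⟩)

theorem pv_best (po sc : Array Int) (n T : Nat) (hT : T ≤ n)
    (hdiff : ∀ i ≤ n, po.getD i 0 - sc.getD i 0 = (i : Int) - (T : Int)) :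
    pvBestLoop po sc (List.range (n + 1)) (0, none) = ((T : Int), some 0) := by
  rw [List.range_eq_range']
  have h0 : n + 1 = n + 1 - 0 := by omega
  rw [h0]
  exact pv_bestLoop_main po sc n T hT hdiff T 0 (0, none) (by omega) (Or.inl rfl)

theorem pv_bscan_none (T : Int) (bl : List (Int × Int)) :
    ∀ cum, cum + (bl.map (fun b => |b.2|)).sum ≤ T → pvBScan T bl cum = none := by
  induction bl with
  | nil => intro cum _; rfl
  | cons b rest ih =>
    intro cum hcum
    obtain ⟨p, v⟩ := b
    simp only [pvBScan, List.map_cons, List.sum_cons] at *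
    have hrest : 0 ≤ (rest.map (fun b => |b.2|)).sum := by
      apply List.sum_nonneg; intro x hx
      simp only [List.mem_map] at hx
      obtain ⟨q, _, rfl⟩ := hx
      positivity
    rw [if_neg (by omega)]
    exact ih _ (by omega)

theorem pv_bscan_some (T : Int) (bl : List (Int × Int)) :
    ∀ cum, cum ≤ T → T < cum + (bl.map (fun b => |b.2|)).sum → ∃ p, pvBScan T bl cum = some p := by
  induction bl with
  | nil => intro cum h1 h2; simp at h2; omega
  | cons b rest ih =>
    intro cum hle hcum
    obtain ⟨p, v⟩ := b
    simp only [pvBScan, List.map_cons, List.sum_cons] at *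
    by_cases h : T < cum + |v|
    · exact ⟨p, by rw [if_pos h]⟩
    · rw [if_neg h]
      have : 0 ≤ |v| := abs_nonneg v
      exact ih _ (by omega) (by omega)

-- A's range scan and B's cumulative scan agree
theorem pv_match (d : PySem.Dict Int Int) (ps : List Int) :
    ∀ (cur T : Int), cur ≤ T → T < cur + ((pvBlocks d ps).map (fun b => |b.2|)).sum →
      pvFindRange T (pvPhase3 d ps cur).2 = pvBScan T (pvBlocks d ps) cur := by
  induction ps with
  | nil =>
    intro cur T h1 h2
    simp [pvBlocks] at h2
    omega
  | cons p rest ih =>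
    intro cur T h1 h2
    rw [pvBlocks_cons] at *
    simp only [pvPhase3]
    rcases eq_or_ne (d.getD p 0) 0 with h | h
    · rw [if_pos h] at h2 ⊢
      rw [if_neg (by simp [h]), h]
      simpa using ih cur T h1 h2
    · rw [if_neg h] at h2 ⊢
      rw [if_pos (by simpa using h)]
      simp only [pvFindRange, pvBScan, List.map_cons, List.sum_cons] at *
      by_cases hin : T < cur + |d.getD p 0|
      · rw [if_pos (by constructor <;> omega), if_pos hin]
      · rw [if_neg (by omega), if_neg hin]
        exact ih _ T (by omega) (by omega)

theorem pv_main (d : PySem.Dict Int Int) (ps : List Int) :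
    (if (pvPhase3 d ps 0).1 = [] then none
     else if (pvBestLoop (pvPrefixOpen (pvPhase3 d ps 0).1 0) (pvSuffixClose (pvPhase3 d ps 0).1)
            (List.range ((pvPhase3 d ps 0).1.length + 1)) (0, none)).1 = 0 then
       (pvPhase3 d ps 0).2.head?.map (·.1)
     else if (pvBestLoop (pvPrefixOpen (pvPhase3 d ps 0).1 0) (pvSuffixClose (pvPhase3 d ps 0).1)
            (List.range ((pvPhase3 d ps 0).1.length + 1)) (0, none)).1 = ((pvPhase3 d ps 0).1.length : Int) then
       (pvPhase3 d ps 0).2.getLast?.map (·.1)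
     else pvFindRange (pvBestLoop (pvPrefixOpen (pvPhase3 d ps 0).1 0) (pvSuffixClose (pvPhase3 d ps 0).1)
            (List.range ((pvPhase3 d ps 0).1.length + 1)) (0, none)).1 (pvPhase3 d ps 0).2)
    =
    (if pvBlocks d ps = [] then none
     else
       match pvBScan ((pvBlocks d ps).filterMap (fun b => if b.2 < 0 then some (-b.2) else none)).sum
           (pvBlocks d ps) 0 with
       | some p => some p
       | none => (PySem.List.pyGet? (pvBlocks d ps) (-1)).map (·.1)) := by
  have halpha := pv_alpha d ps 0
  have hlen := pv_len d ps 0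
  have hcnt := pv_countClose d ps 0
  by_cases hnil : (pvPhase3 d ps 0).1 = []
  · rw [if_pos hnil]
    have hS : pvS d ps = 0 := by rw [← hlen, hnil]; rfl
    rw [if_pos ((pv_blocks_nil_iff d ps).mpr hS)]
  · rw [if_neg hnil]
    have hbne : pvBlocks d ps ≠ [] := by
      intro hc
      apply hnil
      have hS := (pv_blocks_nil_iff d ps).mp hc
      rw [← hlen] at hS
      exact List.eq_nil_of_length_eq_zero (by exact_mod_cast hS)
    rw [if_neg hbne]
    set s := (pvPhase3 d ps 0).1 with hsdef
    set TN := s.countP (fun c => c == ")") with hTNdef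
    have hTn : TN ≤ s.length := List.countP_le_length
    have hbest := pv_best (pvPrefixOpenRec s 0).toArray (pvSuffixCloseRec s).toArray s.length TN hTn
      (fun i hi => by rw [pv_agetD, pv_agetD]; exact pv_diff s halpha i hi)
    rw [pv_po_eq, pv_sc_eq, hbest]
    have hTval : ((pvBlocks d ps).filterMap (fun b => if b.2 < 0 then some (-b.2) else none)).sum
        = (TN : Int) := by rw [pv_blocks_T, ← hcnt]
    rw [hTval]
    have hmap := pv_blocks_map d ps 0
    by_cases h0 : TN = 0
    · rw [if_pos (by simp [h0])]
      cases hb : pvBlocks d ps with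
      | nil => exact absurd hb hbne
      | cons b bs =>
        have hbne2 : b.2 ≠ 0 := pv_blocks_ne d ps b (by rw [hb]; exact List.mem_cons_self)
        have habs : (0 : Int) < 0 + |b.2| := by
          have : 0 < |b.2| := abs_pos.mpr hbne2
          omega
        obtain ⟨p, v⟩ := b
        simp only [pvBScan, h0, Nat.cast_zero]
        rw [if_pos habs]
        calc (pvPhase3 d ps 0).2.head?.map (·.1)
            = ((pvPhase3 d ps 0).2.map (·.1)).head? := List.head?_map.symm
          _ = ((pvBlocks d ps).map (·.1)).head? := by rw [hmap]
          _ = some p := by rw [hb]; rfl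
    · rw [if_neg (by simpa using h0)]
      by_cases hn : TN = s.length
      · rw [if_pos (show ((TN : Int), some (0:Int)).1 = (s.length : Int) by simp [hn])]
        have hnone : pvBScan (TN : Int) (pvBlocks d ps) 0 = none := by
          apply pv_bscan_none
          rw [pv_blocks_sum_abs, ← hlen, ← hn]
          omega
        rw [hnone]
        rw [PySem.List.pyGet?_neg_one]
        calc (pvPhase3 d ps 0).2.getLast?.map (·.1)
            = ((pvPhase3 d ps 0).2.map (·.1)).getLast? := List.getLast?_map.symm
          _ = ((pvBlocks d ps).map (·.1)).getLast? := by rw [hmap]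
          _ = (pvBlocks d ps).getLast?.map (·.1) := List.getLast?_map
      · rw [if_neg (fun hc => hn (by exact_mod_cast (show (TN : Int) = (s.length : Int) from hc)))]
        have hlt : (TN : Int) < 0 + ((pvBlocks d ps).map (fun b => |b.2|)).sum := by
          rw [pv_blocks_sum_abs, ← hlen]
          have : TN < s.length := lt_of_le_of_ne hTn hn
          omega
        rw [pv_match d ps 0 (TN : Int) (by positivity) hlt]
        obtain ⟨p, hp⟩ := pv_bscan_some (TN : Int) (pvBlocks d ps) 0 (by positivity) hlt
        rw [hp]

-- ===== VERDICT (by name: the statement is the Claim_ definition above) =====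
theorem find_fair_price_spec : Claim_equal_find_fair_price := by
  intro orders _
  unfold Spec_find_fair_price find_fair_price find_fair_price_alt
  exact pv_main (pvAgg orders) (PySem.List.sorted (pvAgg orders).keys (fun x => x) false)
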